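-- pv_equiv track=rewrite | github.com/tynassty/ncaaf_realignment | model.py | divide_list_evenly
-- ===== SOURCE A (Python) =====
-- def divide_list_evenly(lst, k):
--     n = len(lst)
--     group_size = n // k
--     remainder = n % k
--
--     groups = []
--     start = 0
--     for i in range(k):
--         if i < remainder:
--             end = start + group_size + 1
--         else:
--             end = start + group_size
--         groups.append(lst[start:end])
--         start = end
--
--     return groups
-- ===== SOURCE B (Python) =====
-- def divide_list_evenly(lst, k):
--     rest = list(lst)
--     groups = []
--     while k > 0:
--         size = len(rest) // k  # the last of k near-even groups is a smallest one
--         groups.append(rest[len(rest) - size:])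
--         del rest[len(rest) - size:]
--         k -= 1
--     groups.reverse()
--     return groups
-- ===== Notes on version B (the rewrite author's own statement) =====
-- stated objective: alternative
-- what changed: Instead of precomputing n//k,n%k and walking a start index forward, B peels a floor(len(rest)/k)-sized group off the END of a working copy each iteration, building the output back-to-front and reversing once.
import Mathlib
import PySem

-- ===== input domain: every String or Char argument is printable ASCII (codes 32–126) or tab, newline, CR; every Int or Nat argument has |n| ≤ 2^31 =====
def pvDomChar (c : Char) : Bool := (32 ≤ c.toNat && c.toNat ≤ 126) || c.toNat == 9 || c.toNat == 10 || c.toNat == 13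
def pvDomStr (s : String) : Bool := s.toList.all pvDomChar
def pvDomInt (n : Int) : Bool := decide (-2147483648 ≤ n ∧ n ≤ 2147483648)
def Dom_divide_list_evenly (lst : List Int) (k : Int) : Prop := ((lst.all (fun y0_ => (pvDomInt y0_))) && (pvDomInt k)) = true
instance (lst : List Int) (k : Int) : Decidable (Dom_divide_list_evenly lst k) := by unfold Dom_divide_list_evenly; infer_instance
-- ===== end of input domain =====

-- B replaces A's accumulator loop over precomputed n//k, n%k by peeling floor-sized
-- groups off the END of the remaining list, building the output back-to-front and
-- reversing once (objective: alternative). Pre_ excludes k = 0 (ZeroDivisionError in A).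


-- ===== PORT A =====
def divide_list_evenly (lst : List Int) (k : Int) : List (List Int) :=
  let n : Int := lst.length
  let group_size := PySem.Int.floordiv n k
  let remainder := PySem.Int.mod n k
  ((PySem.List.pyRange 0 k 1).foldl
    (fun (st : List (List Int) × Int) i =>
      let e := if i < remainder then st.2 + group_size + 1 else st.2 + group_size
      (st.1 ++ [PySem.List.slice lst st.2 e], e))
    ([], 0)).1

-- ===== PORT B =====
-- the while loop of Source B: state (groups, rest, k); exits when k ≤ 0;
-- 'del rest[len(rest)-size:]' leaves rest[:len(rest)-size]
def dleLoop (groups : List (List Int)) (rest : List Int) (k : Int) : List (List Int) :=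
  if _h : k ≤ 0 then groups
  else
    let size := PySem.Int.floordiv (rest.length : Int) k
    dleLoop (groups ++ [PySem.List.slice rest (some ((rest.length : Int) - size)) none])
      (PySem.List.slice rest none (some ((rest.length : Int) - size))) (k - 1)
termination_by k.toNat
decreasing_by omega

def divide_list_evenly_alt (lst : List Int) (k : Int) : List (List Int) :=
  (dleLoop [] lst k).reverse

-- ===== PRECONDITION & SPEC =====
-- A computes len(lst) // k, so k = 0 raises ZeroDivisionError; Pre_ excludes exactly that.
def Pre_divide_list_evenly (lst : List Int) (k : Int) : Prop := k ≠ 0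
instance (lst : List Int) (k : Int) : Decidable (Pre_divide_list_evenly lst k) := by unfold Pre_divide_list_evenly; infer_instance
def pvWitness_divide_list_evenly : List Int × Int := ([1, 2, 3, 4, 5], 2)

def Spec_divide_list_evenly (lst : List Int) (k : Int) (out : List (List Int)) : Prop := out = divide_list_evenly_alt lst k
instance (lst : List Int) (k : Int) (out : List (List Int)) : Decidable (Spec_divide_list_evenly lst k out) := by unfold Spec_divide_list_evenly; infer_instance

-- ===== CLAIM (what is proved, stated in full; the proofs are below) =====
def Claim_equal_divide_list_evenly : Prop := ∀ (lst : List Int) (k : Int), Dom_divide_list_evenly lst k → Pre_divide_list_evenly lst k → Spec_divide_list_evenly lst k (divide_list_evenly lst k)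

-- ===== LEMMAS AND PROOFS =====

-- Proof-side closed form both ports are reduced to: group i is
-- lst[i*q + min(i,r) : (i+1)*q + min(i+1,r)] with q = n // k, r = n % k.
def cfDLE (lst : List Int) (k : Int) : List (List Int) :=
  let n : Int := lst.length
  let q := PySem.Int.floordiv n k
  let r := PySem.Int.mod n k
  (PySem.List.pyRange 0 k 1).map
    (fun i => PySem.List.slice lst (some (i * q + min i r)) (some ((i + 1) * q + min (i + 1) r)))

-- Loop invariant for A's fold: starting at index a with running start a*q + min a r,
-- the accumulated groups are acc followed by the closed-form slices for indices a..k-1.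
theorem dle_inv (lst : List Int) (k q r : Int) :
    ∀ (m : Nat) (a : Int), 0 ≤ a → (k - a).toNat = m → ∀ (acc : List (List Int)),
    ((PySem.List.pyRange a k 1).foldl
      (fun (st : List (List Int) × Int) i =>
        let e := if i < r then st.2 + q + 1 else st.2 + q
        (st.1 ++ [PySem.List.slice lst st.2 e], e))
      (acc, a * q + min a r)).1
    = acc ++ (PySem.List.pyRange a k 1).map
        (fun i => PySem.List.slice lst (some (i * q + min i r)) (some ((i + 1) * q + min (i + 1) r))) := by
  intro m
  induction m with
  | zero =>
    intro a ha hm acc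
    rw [PySem.List.pyRange_one_eq_nil (by omega)]
    simp
  | succ m ih =>
    intro a ha hm acc
    have hak : a < k := by omega
    rw [PySem.List.pyRange_one_cons hak]
    simp only [List.foldl_cons, List.map_cons]
    have he : (if a < r then a * q + min a r + q + 1 else a * q + min a r + q)
        = (a + 1) * q + min (a + 1) r := by
      by_cases h : a < r
      · rw [if_pos h, min_eq_left (by omega), min_eq_left (by omega)]; ring
      · rw [if_neg h, min_eq_right (by omega), min_eq_right (by omega)]; ring
    simp only [he]
    rw [ih (a + 1) (by omega) (by omega)]
    simp

theorem A_eq_cf (lst : List Int) (k : Int) :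
    divide_list_evenly lst k = cfDLE lst k := by
  unfold divide_list_evenly cfDLE
  by_cases hkp : 0 < k
  · have hr : 0 ≤ PySem.Int.mod (lst.length : Int) k := PySem.Int.mod_nonneg _ hkp
    have key := dle_inv lst k (PySem.Int.floordiv (lst.length : Int) k)
      (PySem.Int.mod (lst.length : Int) k) (k - 0).toNat 0 le_rfl rfl []
    simp only [zero_mul, zero_add, min_eq_left hr, List.nil_append] at key
    exact key
  · rw [PySem.List.pyRange_one_eq_nil (by omega)]
    simp

-- A slice of a take-prefix is the same slice of the whole list when its bounds lie in the prefix.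
theorem slice_take_prefix (xs : List Int) (t a b : Int) (ha : 0 ≤ a) (hb : 0 ≤ b) (hbt : b ≤ t) :
    PySem.List.slice (xs.take t.toNat) (some a) (some b) = PySem.List.slice xs (some a) (some b) := by
  rw [PySem.List.slice_toNat _ ha hb, PySem.List.slice_toNat _ ha hb, List.drop_take]
  rw [List.take_take]
  congr 1
  omega

theorem cf_unroll_last (lst : List Int) (k : Int) (hk : 0 < k) :
    cfDLE lst k
      = cfDLE (PySem.List.slice lst none (some ((lst.length : Int) - PySem.Int.floordiv (lst.length : Int) k))) (k - 1)
        ++ [PySem.List.slice lst (some ((lst.length : Int) - PySem.Int.floordiv (lst.length : Int) k)) none] := by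
  have hn0 : (0:Int) ≤ (lst.length : Int) := by positivity
  set n : Int := (lst.length : Int) with hn
  set q := PySem.Int.floordiv n k with hqdef
  set r := PySem.Int.mod n k with hrdef
  have hqr : q * k + r = n := PySem.Int.floordiv_mul_add_mod n k
  have hr0 : 0 ≤ r := PySem.Int.mod_nonneg n hk
  have hrk : r < k := PySem.Int.mod_lt n hk
  have hq0 : 0 ≤ q := by
    rw [hqdef, PySem.Int.floordiv_eq_ediv_of_pos hk]; exact Int.ediv_nonneg hn0 (le_of_lt hk)
  have hqk : q ≤ q * k := le_mul_of_one_le_right hq0 hk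
  have hqn : q ≤ n := by omega
  -- the left side: split off the last index k-1
  rw [show cfDLE lst k = (PySem.List.pyRange 0 k 1).map
      (fun i => PySem.List.slice lst (some (i * q + min i r)) (some ((i + 1) * q + min (i + 1) r))) from rfl]
  rw [show k = (k - 1) + 1 from by ring, PySem.List.pyRange_one_succ_right (by omega), List.map_append,
    List.map_singleton]
  rw [show (k - 1) + 1 = k from by ring]
  -- the last group is lst[n-q:]
  have hlast : PySem.List.slice lst (some ((k - 1) * q + min (k - 1) r)) (some (k * q + min k r))
      = PySem.List.slice lst (some (n - q)) none := by
    have e1 : (k - 1) * q + min (k - 1) r = n - q := by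
      have : (k - 1) * q = q * k - q := by ring
      omega
    have e2 : k * q + min k r = n := by
      have : k * q = q * k := by ring
      omega
    rw [e1, e2, PySem.List.slice_toNat _ (by omega) hn0, PySem.List.slice_from _ (by omega)]
    apply List.take_of_length_le
    simp [List.length_drop]
    omega
  rw [hlast]
  congr 1
  -- the first k-1 groups: the prefix lst[:n-q] with k-1 groups
  rw [PySem.List.slice_to _ (by omega : (0:Int) ≤ n - q)]
  have htlen : (((lst.take (n - q).toNat).length : Nat) : Int) = n - q := by
    simp [List.length_take]; omega
  rcases eq_or_lt_of_le (Int.add_one_le_iff.mpr hk) with hk1 | hk2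
  · -- k = 1
    have hk1' : k = 1 := by omega
    subst hk1'
    rw [PySem.List.pyRange_one_eq_nil (by omega)]
    have hnil : cfDLE (lst.take (n - q).toNat) (1 - 1) = [] := by
      simp only [cfDLE]
      rw [PySem.List.pyRange_one_eq_nil (by omega)]
      simp
    rw [hnil]
    simp
  · -- k ≥ 2
    have hk2' : (0:Int) < k - 1 := by omega
    -- q2 and r2 of the prefix: q+1 and 0 if r = k-1, else q and r
    have hq2 : PySem.Int.floordiv (((lst.take (n - q).toNat).length : Nat) : Int) (k - 1)
        = (if r = k - 1 then q + 1 else q) := by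
      rw [htlen, PySem.Int.floordiv_eq_iff_of_pos hk2']
      split_ifs with hr1
      · have e1 : (q + 1) * (k - 1) = q * k + k - q - 1 := by ring
        have e2 : (q + 1 + 1) * (k - 1) = q * k + 2 * k - q - 2 := by ring
        rw [e1, e2]; omega
      · have e1 : q * (k - 1) = q * k - q := by ring
        have e2 : (q + 1) * (k - 1) = q * k + k - q - 1 := by ring
        rw [e1, e2]; omega
    have hr2 : PySem.Int.mod (((lst.take (n - q).toNat).length : Nat) : Int) (k - 1)
        = (if r = k - 1 then 0 else r) := by
      have h := PySem.Int.floordiv_mul_add_mod (((lst.take (n - q).toNat).length : Nat) : Int) (k - 1)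
      rw [hq2] at h
      rw [htlen] at h ⊢
      split_ifs at h ⊢ with hr1
      · have e1 : (q + 1) * (k - 1) = q * k + k - q - 1 := by ring
        rw [e1] at h; omega
      · have e1 : q * (k - 1) = q * k - q := by ring
        rw [e1] at h; omega
    rw [show cfDLE (lst.take (n - q).toNat) (k - 1)
        = (PySem.List.pyRange 0 (k - 1) 1).map
          (fun i => PySem.List.slice (lst.take (n - q).toNat)
            (some (i * PySem.Int.floordiv (((lst.take (n - q).toNat).length : Nat) : Int) (k - 1)
                   + min i (PySem.Int.mod (((lst.take (n - q).toNat).length : Nat) : Int) (k - 1))))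
            (some ((i + 1) * PySem.Int.floordiv (((lst.take (n - q).toNat).length : Nat) : Int) (k - 1)
                   + min (i + 1) (PySem.Int.mod (((lst.take (n - q).toNat).length : Nat) : Int) (k - 1))))) from rfl]
    rw [hq2, hr2]
    apply List.map_congr_left
    intro i hi
    rw [PySem.List.mem_pyRange_one] at hi
    obtain ⟨hi0, hik⟩ := hi
    have hq2nn : (0:Int) ≤ (if r = k - 1 then q + 1 else q) := by split_ifs <;> omega
    -- the two boundary expressions agree for 0 ≤ i ≤ k-1
    have hbound : ∀ (j : Int), 0 ≤ j → j ≤ k - 1 →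
        j * q + min j r = j * (if r = k - 1 then q + 1 else q) + min j (if r = k - 1 then 0 else r) := by
      intro j hj0 hjk
      split_ifs with hr1
      · have e : j * (q + 1) = j * q + j := by ring
        omega
      · rfl
    rw [← hbound i hi0 (by omega), ← hbound (i + 1) (by omega) (by omega)]
    -- boundaries lie inside the prefix, so slicing the prefix = slicing lst
    have hub : (i + 1) * q + min (i + 1) r ≤ n - q := by
      have h1 : (i + 1) * q ≤ (k - 1) * q := mul_le_mul_of_nonneg_right (by omega) hq0
      have h2 : (k - 1) * q = q * k - q := by ring
      omega
    exact (slice_take_prefix lst (n - q) _ _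
      (add_nonneg (mul_nonneg hi0 hq0) (le_min hi0 hr0)) (by
        have : 0 ≤ (i + 1) * q := mul_nonneg (by omega) hq0
        omega) hub).symm

-- B's loop: the accumulated groups are 'groups' followed by the reversed closed form
-- of the remaining list (peeling induction on k, from the end).
theorem B_loop_cf : ∀ (m : Nat) (groups : List (List Int)) (rest : List Int) (k : Int), k.toNat = m →
    dleLoop groups rest k = groups ++ (cfDLE rest k).reverse := by
  intro m
  induction m with
  | zero =>
    intro groups rest k hm
    rw [dleLoop, dif_pos (by omega)]
    unfold cfDLE
    rw [PySem.List.pyRange_one_eq_nil (by omega)]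
    simp
  | succ m ih =>
    intro groups rest k hm
    rw [dleLoop, dif_neg (by omega)]
    show dleLoop
        (groups ++ [PySem.List.slice rest (some ((rest.length : Int) - PySem.Int.floordiv (rest.length : Int) k)) none])
        (PySem.List.slice rest none (some ((rest.length : Int) - PySem.Int.floordiv (rest.length : Int) k))) (k - 1)
      = groups ++ (cfDLE rest k).reverse
    rw [ih _ _ (k - 1) (by omega), cf_unroll_last rest k (by omega)]
    simp

-- ===== VERDICT (by name: the statement is the Claim_ definition above) =====
theorem divide_list_evenly_spec : Claim_equal_divide_list_evenly := by
  intro lst k _ _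
  show divide_list_evenly lst k = divide_list_evenly_alt lst k
  rw [A_eq_cf lst k]
  show _ = (dleLoop [] lst k).reverse
  rw [B_loop_cf k.toNat [] lst k rfl, List.nil_append, List.reverse_reverse]
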